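-- pv_equiv track=rewrite | github.com/Aasthaengg/IBMdataset | Python_codes/p03213/s213951705.py | f
-- ===== SOURCE A (Python) =====
-- def f(n):
--     # prime factorization of n!
--     pf = [0 for _ in range(n + 1)]
--     for i in range(2, n + 1):
--         cur = i
--         for j in range(2, i + 1):
--             while cur % j == 0:
--                 pf[j] += 1
--                 cur //= j
--     return pf
-- ===== SOURCE B (Python) =====
-- def _is_prime(p):
--     d = 2
--     while d * d <= p:
--         if p % d == 0:
--             return False
--         d += 1
--     return True
--
--
-- def f(n):
--     # prime factorization of n! via Legendre's formula per prime
--     pf = [0] * (n + 1)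
--     for p in range(2, n + 1):
--         if _is_prime(p):
--             q = p
--             while q <= n:
--                 pf[p] += n // q
--                 q *= p
--     return pf
-- ===== Notes on version B (the rewrite author's own statement) =====
-- stated objective: faster
-- what changed: A trial-divides every i in 2..n by every j in 2..i and accumulates exponents; B instead computes, for each prime p up to n (primality by sqrt-bounded trial division), the exponent of p in n! directly by Legendre's formula sum(n // p^k), never touching the numbers 2..n themselves.
import Mathlib
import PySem

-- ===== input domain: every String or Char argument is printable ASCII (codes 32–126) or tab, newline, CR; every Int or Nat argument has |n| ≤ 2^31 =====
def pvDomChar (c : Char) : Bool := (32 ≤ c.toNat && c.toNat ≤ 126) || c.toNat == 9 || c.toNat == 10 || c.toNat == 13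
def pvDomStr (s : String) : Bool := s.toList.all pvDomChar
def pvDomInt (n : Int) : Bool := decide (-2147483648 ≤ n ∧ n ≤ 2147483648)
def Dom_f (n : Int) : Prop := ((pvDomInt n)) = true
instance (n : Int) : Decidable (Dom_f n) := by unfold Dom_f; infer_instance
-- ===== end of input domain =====

-- B replaces A's all-pairs trial division by Legendre's formula per prime (measured faster); equal outputs are proved for every n.

-- ===== PORT A =====
-- pf[j] += 1.  In every call A makes, 2 ≤ j ≤ n < len(pf), so the index is in
-- range and pySetD/pyGetD are exact (Python raises only out of range, unreachable).
def pfBump (pf : List Int) (j : Int) : List Int :=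
  PySem.List.pySetD pf j (PySem.List.pyGetD pf j 0 + 1)

-- `while cur % j == 0: pf[j] += 1; cur //= j`, with a fuel bound (callers pass
-- fuel = cur ≥ iterations + 1, so the 0-case is never reached; pure totality guard).
def whileDivA (fuel : Nat) (pf : List Int) (cur j : Int) : List Int × Int :=
  match fuel with
  | 0 => (pf, cur)
  | fuel + 1 =>
    if PySem.Int.mod cur j = 0 then
      whileDivA fuel (pfBump pf j) (PySem.Int.floordiv cur j) j
    else (pf, cur)

def f (n : Int) : List Int :=
  let pf := (PySem.List.pyRange 0 (n + 1)).map (fun _ => (0 : Int))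
  (PySem.List.pyRange 2 (n + 1)).foldl
    (fun pf i =>
      ((PySem.List.pyRange 2 (i + 1)).foldl
        (fun st j => whileDivA st.2.toNat st.1 st.2 j) (pf, i)).1)
    pf

-- ===== PORT B =====
-- `while d*d <= p: if p % d == 0: return False; d += 1; return True`, fuelled
-- (callers pass fuel = p ≥ iterations + 1; the 0-case is never reached).
def isPrimeLoop (fuel : Nat) (p d : Int) : Bool :=
  match fuel with
  | 0 => true
  | fuel + 1 =>
    if d * d ≤ p then
      (if PySem.Int.mod p d = 0 then false else isPrimeLoop fuel p (d + 1))
    else true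

def isPrime (p : Int) : Bool := isPrimeLoop p.toNat p 2

-- `while q <= n: pf[p] += n // q; q *= p`, fuelled (callers pass fuel = n,
-- enough for all iterations; the index p is always in range, pySetD/pyGetD exact).
def qLoopB (fuel : Nat) (pf : List Int) (q p n : Int) : List Int :=
  match fuel with
  | 0 => pf
  | fuel + 1 =>
    if q ≤ n then
      qLoopB fuel (PySem.List.pySetD pf p (PySem.List.pyGetD pf p 0 + PySem.Int.floordiv n q)) (q * p) p n
    else pf

def f_alt (n : Int) : List Int :=
  let pf := PySem.List.pyRepeat [(0 : Int)] (n + 1)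
  (PySem.List.pyRange 2 (n + 1)).foldl
    (fun pf p => if isPrime p then qLoopB n.toNat pf p p n else pf) pf

-- ===== PRECONDITION & SPEC =====
def Spec_f (n : Int) (out : List Int) : Prop := out = f_alt n
instance (n : Int) (out : List Int) : Decidable (Spec_f n out) := by unfold Spec_f; infer_instance

-- ===== CLAIM (what is proved, stated in full; the proofs are below) =====
def Claim_equal_f : Prop := ∀ (n : Int), Dom_f n → Spec_f n (f n)

-- ===== LEMMAS AND PROOFS =====

-- Both programs' pf-arrays are lists `(List.range L).map g`; setting/reading one cell:
lemma vec_set {L : Nat} (g : Nat → Int) {j : Nat} (hj : j < L) (v : Int) :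
    ((List.range L).map g).set j v = (List.range L).map (Function.update g j v) := by
  apply List.ext_getElem (by simp)
  intro k h1 h2
  simp only [List.getElem_set, List.getElem_map, List.getElem_range, Function.update_apply]
  rcases eq_or_ne j k with h | h
  · simp [h]
  · rw [if_neg h, if_neg (Ne.symm h)]

lemma vec_getD {L : Nat} (g : Nat → Int) {j : Nat} (hj : j < L) :
    ((List.range L).map g).getD j 0 = g j :=
  PySem.List.getD_map_range g L j 0 hj

lemma pfBump_vec {L : Nat} (g : Nat → Int) {j : Nat} (hj : j < L) :
    pfBump ((List.range L).map g) ((j : Nat) : Int)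
      = (List.range L).map (Function.update g j (g j + 1)) := by
  rw [pfBump, PySem.List.pySetD_natCast, PySem.List.pyGetD_natCast, vec_getD g hj, vec_set g hj]

lemma pfBump_iter {L : Nat} (g : Nat → Int) {j : Nat} (hj : j < L) (k : Nat) :
    (fun l => pfBump l ((j : Nat) : Int))^[k] ((List.range L).map g)
      = (List.range L).map (Function.update g j (g j + (k : Int))) := by
  induction k generalizing g with
  | zero =>
    simp only [Function.iterate_zero, id_eq, Nat.cast_zero, add_zero, Function.update_eq_self]
  | succ k ih =>
    rw [Function.iterate_succ_apply, pfBump_vec g hj, ih (Function.update g j (g j + 1))]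
    congr 1
    funext x
    by_cases hx : x = j
    · subst hx
      simp only [Function.update_self]
      push_cast; ring
    · simp [hx]

lemma whileDivA_run (fuel : Nat) (pf : List Int) (j k t : Nat) (hj : 2 ≤ j) (ht : 0 < t)
    (hnd : ¬ j ∣ t) (hfuel : k < fuel) :
    whileDivA fuel pf (((j ^ k * t : Nat) : Int)) ((j : Nat) : Int)
      = ((fun l => pfBump l ((j : Nat) : Int))^[k] pf, ((t : Nat) : Int)) := by
  induction k generalizing pf fuel with
  | zero =>
    obtain ⟨fuel, rfl⟩ : ∃ f', fuel = f' + 1 := ⟨fuel - 1, by omega⟩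
    rw [whileDivA]
    have : ¬ PySem.Int.mod ((j ^ 0 * t : Nat) : Int) ((j : Nat) : Int) = 0 := by
      rw [PySem.Int.mod_eq_zero_iff_dvd, Int.natCast_dvd_natCast]
      simpa using hnd
    rw [if_neg this]
    simp
  | succ k ih =>
    obtain ⟨fuel, rfl⟩ : ∃ f', fuel = f' + 1 := ⟨fuel - 1, by omega⟩
    rw [whileDivA]
    have hdvd : ((j : Nat) : Int) ∣ ((j ^ (k + 1) * t : Nat) : Int) := by
      rw [Int.natCast_dvd_natCast]; exact ⟨j ^ k * t, by ring⟩
    rw [if_pos ((PySem.Int.mod_eq_zero_iff_dvd _ _).mpr hdvd)]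
    rw [PySem.Int.floordiv_natCast]
    have hq : (j ^ (k + 1) * t) / j = j ^ k * t := by
      rw [pow_succ, mul_comm (j ^ k) j, mul_assoc]
      exact Nat.mul_div_cancel_left _ (by omega)
    rw [hq, ih (pf := pfBump pf ((j : Nat) : Int)) (fuel := fuel) (hfuel := by omega)]
    rw [← Function.iterate_succ_apply]

-- ---- A's inner loop: starting from (pf, c) at j = a, where c is i with all prime
-- factors below a removed, the loop adds i's prime exponents at positions ≥ a and ends with cur = 1.
lemma innerAux (m i : Nat) (hi2 : 2 ≤ i) (him : i ≤ m) :
    ∀ (fuel a : Nat), i + 1 - a = fuel → 2 ≤ a → a ≤ i + 1 →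
    ∀ (g : Nat → Int) (c : Nat), 0 < c →
    (∀ p, Nat.Prime p → p < a → ¬ p ∣ c) →
    (∀ x, a ≤ x → c.factorization x = i.factorization x) →
    (PySem.List.pyRange ((a : Nat) : Int) ((i : Int) + 1)).foldl
        (fun st j => whileDivA st.2.toNat st.1 st.2 j) ((List.range (m + 1)).map g, ((c : Nat) : Int))
      = ((List.range (m + 1)).map
          (fun x => g x + if a ≤ x then (i.factorization x : Int) else 0), 1) := by
  intro fuel
  induction fuel with
  | zero =>
    intro a hfa ha2 hai g c hc h1 h2
    have hae : a = i + 1 := by omega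
    subst hae
    rw [PySem.List.pyRange_one_eq_nil (by push_cast; omega)]
    have hc1 : c = 1 := by
      rw [Nat.eq_one_iff_not_exists_prime_dvd]
      intro p hp hdvd
      by_cases hpa : p < i + 1
      · exact h1 p hp hpa hdvd
      · have h0 : c.factorization p = 0 := by
          rw [h2 p (by omega)]
          exact Nat.factorization_eq_zero_of_lt (by omega)
        have := hp.factorization_pos_of_dvd (by omega) hdvd
        omega
    subst hc1
    simp only [List.foldl_nil, Nat.cast_one, Prod.mk.injEq]
    refine ⟨?_, by trivial⟩
    · apply List.map_congr_left
      intro x hx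
      have hxm : x < m + 1 := by simpa using List.mem_range.mp hx
      by_cases hix : i + 1 ≤ x
      · rw [if_pos hix, Nat.factorization_eq_zero_of_lt (by omega)]
        simp
      · rw [if_neg hix]; simp
  | succ fuel ih =>
    intro a hfa ha2 hai g c hc h1 h2
    have hale : a ≤ i := by omega
    rw [PySem.List.pyRange_one_cons (by push_cast; omega), List.foldl_cons]
    have hcast : ((a : Int) + 1) = (((a + 1 : Nat)) : Int) := by push_cast [Nat.cast_add]; ring
    by_cases hp : Nat.Prime a
    · -- prime step: the while-loop strips a^(v_a c) and bumps pf[a] that many times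
      set k := c.factorization a with hk
      set t := c / a ^ c.factorization a with hts
      have hct : a ^ k * t = c := Nat.ordProj_mul_ordCompl_eq_self c a
      have ht : 0 < t := Nat.ordCompl_pos a (by omega)
      have hnd : ¬ a ∣ t := Nat.not_dvd_ordCompl hp (by omega)
      have hkc : k < c := by
        have h1' : k < 2 ^ k := Nat.lt_two_pow_self
        have h2' : 2 ^ k ≤ a ^ k := Nat.pow_le_pow_left hp.two_le k
        have h3' : a ^ k ≤ a ^ k * t := Nat.le_mul_of_pos_right _ ht
        omega
      have hrun := whileDivA_run c ((List.range (m + 1)).map g) a k t hp.two_le ht hnd hkc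
      rw [hct] at hrun
      have hstep :
          whileDivA (((c : Nat) : Int)).toNat ((List.range (m + 1)).map g) ((c : Nat) : Int) ((a : Nat) : Int)
            = ((fun l => pfBump l ((a : Nat) : Int))^[k] ((List.range (m + 1)).map g), ((t : Nat) : Int)) := by
        rw [Int.toNat_natCast]; exact hrun
      simp only [hstep]
      rw [pfBump_iter g (by omega) k]
      rw [hcast]
      rw [ih (a + 1) (by omega) (by omega) (by omega) _ t ht ?h1' ?h2']
      case h1' =>
        intro p hpp hplt hpd
        by_cases hpa : p = a
        · exact hnd (hpa ▸ hpd)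
        · exact h1 p hpp (by omega) (hpd.trans (Nat.ordCompl_dvd c a))
      case h2' =>
        intro x hx
        have : (c / a ^ c.factorization a).factorization = Finsupp.erase a c.factorization :=
          Nat.factorization_ordCompl c a
        rw [← hts] at this
        rw [this, Finsupp.erase_ne (by omega)]
        exact h2 x (by omega)
      simp only [Prod.mk.injEq]
      refine ⟨?_, by trivial⟩
      · apply List.map_congr_left
        intro x hx
        by_cases hxa : x = a
        · subst hxa
          rw [Function.update_self, if_neg (by omega), if_pos le_rfl]
          have : k = i.factorization x := by rw [hk]; exact h2 x le_rfl
          rw [this]; ring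
        · rw [Function.update_apply, if_neg hxa]
          have : (if a + 1 ≤ x then (i.factorization x : Int) else 0)
               = (if a ≤ x then (i.factorization x : Int) else 0) := by
            split_ifs with u v v <;> first | rfl | omega
          rw [this]
    · -- composite step: a does not divide c, the while-loop does nothing
      have hnda : ¬ a ∣ c := by
        intro hac
        have hq1 : a.minFac.Prime := Nat.minFac_prime (by omega)
        have hq2 : a.minFac ∣ a := Nat.minFac_dvd a
        have hq3 : a.minFac < a := by
          have hle : a.minFac ≤ a := Nat.le_of_dvd (by omega) hq2
          rcases lt_or_eq_of_le hle with h | h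
          · exact h
          · exact absurd (Nat.prime_def_minFac.mpr ⟨ha2, h⟩) hp
        exact h1 a.minFac hq1 hq3 (hq2.trans hac)
      have hstep :
          whileDivA (((c : Nat) : Int)).toNat ((List.range (m + 1)).map g) ((c : Nat) : Int) ((a : Nat) : Int)
            = ((List.range (m + 1)).map g, ((c : Nat) : Int)) := by
        rw [Int.toNat_natCast]
        obtain ⟨c', rfl⟩ : ∃ c', c = c' + 1 := ⟨c - 1, by omega⟩
        rw [whileDivA]
        rw [if_neg]
        rw [PySem.Int.mod_eq_zero_iff_dvd, Int.natCast_dvd_natCast]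
        exact hnda
      simp only [hstep]
      rw [hcast]
      rw [ih (a + 1) (by omega) (by omega) (by omega) g c hc ?h1'' ?h2'']
      case h1'' =>
        intro p hpp hplt hpd
        by_cases hpa : p = a
        · exact hp (hpa ▸ hpp)
        · exact h1 p hpp (by omega) hpd
      case h2'' =>
        intro x hx
        exact h2 x (by omega)
      simp only [Prod.mk.injEq]
      refine ⟨?_, by trivial⟩
      · apply List.map_congr_left
        intro x hx
        by_cases hxa : x = a
        · subst hxa
          rw [if_neg (by omega), if_pos le_rfl,
              Nat.factorization_eq_zero_of_not_prime _ hp]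
          simp
        · have : (if a + 1 ≤ x then (i.factorization x : Int) else 0)
               = (if a ≤ x then (i.factorization x : Int) else 0) := by
            split_ifs with u v v <;> first | rfl | omega
          rw [this]

lemma innerA (m i : Nat) (hi2 : 2 ≤ i) (him : i ≤ m) (g : Nat → Int) :
    (PySem.List.pyRange 2 ((i : Int) + 1)).foldl
        (fun st j => whileDivA st.2.toNat st.1 st.2 j) ((List.range (m + 1)).map g, (i : Int))
      = ((List.range (m + 1)).map (fun x => g x + (i.factorization x : Int)), 1) := by
  have h := innerAux m i hi2 him (i + 1 - 2) 2 rfl le_rfl (by omega) g i (by omega)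
    (fun p hp hlt => absurd hp.two_le (by omega))
    (fun x _ => rfl)
  have hc2 : (((2 : Nat)) : Int) = (2 : Int) := by norm_num
  rw [hc2] at h
  rw [h, Prod.mk.injEq]
  refine ⟨?_, by trivial⟩
  · apply List.map_congr_left
    intro x hx
    by_cases h2x : 2 ≤ x
    · rw [if_pos h2x]
    · rw [if_neg h2x]
      have : ¬ x.Prime := by
        interval_cases x
        · exact Nat.not_prime_zero
        · exact Nat.not_prime_one
      rw [Nat.factorization_eq_zero_of_not_prime _ this]
      simp

-- A's outer loop: pf holds the exponents of (a-1)! and accumulates up to m!.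
lemma outerA (m : Nat) :
    ∀ (fuel a : Nat), m + 1 - a = fuel → 2 ≤ a → a ≤ m + 1 →
    (PySem.List.pyRange ((a : Nat) : Int) ((m : Int) + 1)).foldl
        (fun pf i =>
          ((PySem.List.pyRange 2 (i + 1)).foldl
            (fun st j => whileDivA st.2.toNat st.1 st.2 j) (pf, i)).1)
        ((List.range (m + 1)).map (fun x => (((a - 1).factorial.factorization x : Nat) : Int)))
      = (List.range (m + 1)).map (fun x => ((m.factorial.factorization x : Nat) : Int)) := by
  intro fuel
  induction fuel with
  | zero =>
    intro a hfa ha2 hai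
    have hae : a = m + 1 := by omega
    subst hae
    rw [PySem.List.pyRange_one_eq_nil (by push_cast; omega)]
    simp
  | succ fuel ih =>
    intro a hfa ha2 hai
    have hale : a ≤ m := by omega
    rw [PySem.List.pyRange_one_cons (by push_cast; omega), List.foldl_cons]
    rw [innerA m a ha2 hale _]
    have hfac : a.factorial = a * (a - 1).factorial := by
      obtain ⟨b, rfl⟩ : ∃ b, a = b + 1 := ⟨a - 1, by omega⟩
      simp [Nat.factorial_succ]
    have hstep : (fun x => ((((a - 1).factorial.factorization x : Nat) : Int)) + ((a.factorization x : Nat) : Int))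
        = fun x => ((a.factorial.factorization x : Nat) : Int) := by
      funext x
      rw [hfac, Nat.factorization_mul (by omega) (Nat.factorial_ne_zero _)]
      push_cast [Finsupp.add_apply]
      ring
    rw [hstep]
    have hcast : ((a : Int) + 1) = (((a + 1 : Nat)) : Int) := by push_cast [Nat.cast_add]; ring
    have := ih (a + 1) (by omega) (by omega) (by omega)
    rw [show (a + 1 - 1) = a by omega] at this
    rw [hcast, this]

lemma f_eq (m : Nat) :
    f ((m : Nat) : Int) = (List.range (m + 1)).map (fun x => ((m.factorial.factorization x : Nat) : Int)) := by
  show ((PySem.List.pyRange 2 ((m : Int) + 1)).foldl _ ((PySem.List.pyRange 0 ((m : Int) + 1)).map (fun _ => (0 : Int)))) = _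
  have hinit : (PySem.List.pyRange 0 ((m : Int) + 1)).map (fun _ => (0 : Int))
      = (List.range (m + 1)).map (fun x => (((1).factorial.factorization x : Nat) : Int)) := by
    rw [PySem.List.pyRange_one, List.map_map]
    have hL : (((m : Int) + 1 - 0)).toNat = m + 1 := by omega
    rw [hL]
    apply List.map_congr_left
    intro x hx
    simp [Nat.factorial]
  rw [hinit]
  by_cases hm : 2 ≤ m
  · have h := outerA m (m + 1 - 2) 2 rfl le_rfl (by omega)
    have hc2 : (((2 : Nat)) : Int) = (2 : Int) := by norm_num
    rw [hc2] at h
    rw [show ((2 : Nat) - 1) = 1 by rfl] at h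
    exact h
  · rw [PySem.List.pyRange_one_eq_nil (by omega)]
    apply List.map_congr_left
    intro x hx
    interval_cases m <;> simp [Nat.factorial]

-- ---- B side ----
lemma isPrimeLoop_spec :
    ∀ (fuel p d : Nat), 2 ≤ p → 2 ≤ d → p < fuel + d →
    (∀ e, 2 ≤ e → e < d → ¬ e ∣ p) →
    isPrimeLoop fuel ((p : Nat) : Int) ((d : Nat) : Int) = decide p.Prime := by
  intro fuel
  induction fuel with
  | zero =>
    intro p d hp2 hd2 hlt hnd
    rw [isPrimeLoop]
    have : p.Prime := by
      rw [Nat.prime_def_lt']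
      exact ⟨hp2, fun e he2 hep => hnd e he2 (by omega)⟩
    simp [this]
  | succ fuel ih =>
    intro p d hp2 hd2 hlt hnd
    rw [isPrimeLoop]
    by_cases hdd : d * d ≤ p
    · rw [if_pos (by push_cast; exact_mod_cast hdd)]
      by_cases hdvd : d ∣ p
      · rw [if_pos ((PySem.Int.mod_eq_zero_iff_dvd _ _).mpr (Int.natCast_dvd_natCast.mpr hdvd))]
        have hdp : d < p := by nlinarith
        have : ¬ p.Prime := by
          intro hpr
          rcases (Nat.Prime.eq_one_or_self_of_dvd hpr d hdvd) with h | h <;> omega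
        simp [this]
      · rw [if_neg (by
          rw [PySem.Int.mod_eq_zero_iff_dvd, Int.natCast_dvd_natCast]; exact hdvd)]
        have hcast : ((d : Int) + 1) = (((d + 1 : Nat)) : Int) := by push_cast; ring
        rw [hcast]
        apply ih p (d + 1) hp2 (by omega) (by omega)
        intro e he2 hed
        by_cases he : e = d
        · exact he ▸ hdvd
        · exact hnd e he2 (by omega)
    · rw [if_neg (by push_cast; exact_mod_cast hdd)]
      have : p.Prime := by
        rw [Nat.prime_def_le_sqrt]
        refine ⟨hp2, fun e he2 hes => ?_⟩
        have he2' : e * e ≤ p := Nat.le_sqrt.mp hes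
        have hed : e < d := by nlinarith
        exact hnd e he2 hed
      simp [this]

lemma isPrime_eq (p : Nat) (hp2 : 2 ≤ p) :
    isPrime ((p : Nat) : Int) = decide p.Prime := by
  rw [isPrime, Int.toNat_natCast]
  have hc2 : (2 : Int) = (((2 : Nat)) : Int) := by norm_num
  rw [hc2]
  exact isPrimeLoop_spec p p 2 hp2 le_rfl (by omega)
    (fun e he2 helt => by omega)

lemma qLoopB_run (m p : Nat) (hp2 : 2 ≤ p) (hpm : p ≤ m) :
    ∀ (fuel j : Nat) (g : Nat → Int), 1 ≤ j → m < p ^ j * fuel →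
    qLoopB fuel ((List.range (m + 1)).map g) (((p ^ j : Nat)) : Int) ((p : Nat) : Int) ((m : Nat) : Int)
      = (List.range (m + 1)).map
          (Function.update g p (g p + ((∑ i ∈ Finset.Ico j (Nat.log p m + 1), m / p ^ i : Nat) : Int))) := by
  intro fuel
  have hm0 : m ≠ 0 := by omega
  induction fuel with
  | zero =>
    intro j g hj hbound
    rw [qLoopB]
    have hpj : m < p ^ j := absurd hbound (by simp)
    have hsum : (∑ i ∈ Finset.Ico j (Nat.log p m + 1), m / p ^ i) = 0 := by
      apply Finset.sum_eq_zero
      intro i hi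
      have hji : j ≤ i := (Finset.mem_Ico.mp hi).1
      exact Nat.div_eq_of_lt (lt_of_lt_of_le hpj (Nat.pow_le_pow_right (by omega) hji))
    rw [hsum]
    simp [Function.update_eq_self]
  | succ fuel ih =>
    intro j g hj hbound
    rw [qLoopB]
    by_cases hq : p ^ j ≤ m
    · rw [if_pos (by exact_mod_cast hq)]
      rw [PySem.List.pySetD_natCast, PySem.List.pyGetD_natCast, vec_getD g (by omega),
          PySem.Int.floordiv_natCast, vec_set g (by omega)]
      have hcast : ((p ^ j : Nat) : Int) * ((p : Nat) : Int) = (((p ^ (j + 1) : Nat)) : Int) := by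
        push_cast [pow_succ]; ring
      rw [hcast]
      have hfuel1 : 1 ≤ fuel := by
        rcases Nat.eq_zero_or_pos fuel with h | h
        · subst h; simp at hbound; omega
        · exact h
      have hbound' : m < p ^ (j + 1) * fuel := by
        have e1 : p ^ j * (fuel + 1) = p ^ j * fuel + p ^ j := by ring
        have e2 : p ^ j ≤ p ^ j * fuel := Nat.le_mul_of_pos_right _ hfuel1
        have e3 : p ^ j * fuel + p ^ j * fuel ≤ p ^ (j + 1) * fuel := by
          have : 2 * p ^ j ≤ p * p ^ j := Nat.mul_le_mul_right _ hp2
          calc p ^ j * fuel + p ^ j * fuel = 2 * p ^ j * fuel := by ring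
            _ ≤ p * p ^ j * fuel := Nat.mul_le_mul_right _ this
            _ = p ^ (j + 1) * fuel := by rw [pow_succ]; ring
        omega
      rw [ih (j + 1) _ (by omega) hbound']
      congr 1
      funext x
      by_cases hx : x = p
      · subst hx
        rw [Function.update_self, Function.update_self, Function.update_self]
        have hjlog : j ≤ Nat.log x m := (Nat.le_log_iff_pow_le (by omega) hm0).mpr hq
        rw [show (∑ i ∈ Finset.Ico j (Nat.log x m + 1), m / x ^ i)
              = m / x ^ j + ∑ i ∈ Finset.Ico (j + 1) (Nat.log x m + 1), m / x ^ i from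
            Finset.sum_eq_sum_Ico_succ_bot (by omega) _]
        push_cast
        ring
      · simp [hx]
    · rw [if_neg (by exact_mod_cast hq)]
      have hsum : (∑ i ∈ Finset.Ico j (Nat.log p m + 1), m / p ^ i) = 0 := by
        apply Finset.sum_eq_zero
        intro i hi
        have hji : j ≤ i := (Finset.mem_Ico.mp hi).1
        exact Nat.div_eq_of_lt
          (lt_of_lt_of_le (by omega) (Nat.pow_le_pow_right (by omega) hji))
      rw [hsum]
      simp [Function.update_eq_self]

-- B's outer loop: adds m!'s exponent at every prime position ≥ a, nothing elsewhere.
lemma outerB (m : Nat) :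
    ∀ (fuel a : Nat), 2 ≤ a → m + 1 ≤ fuel + a →
    ∀ (g : Nat → Int),
    (PySem.List.pyRange ((a : Nat) : Int) ((m : Int) + 1)).foldl
        (fun pf p => if isPrime p then qLoopB m pf p p ((m : Nat) : Int) else pf)
        ((List.range (m + 1)).map g)
      = (List.range (m + 1)).map
          (fun x => g x + if a ≤ x then ((m.factorial.factorization x : Nat) : Int) else 0) := by
  intro fuel
  induction fuel with
  | zero =>
    intro a ha2 hfa g
    rw [PySem.List.pyRange_one_eq_nil (by push_cast; omega)]
    simp only [List.foldl_nil]
    apply List.map_congr_left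
    intro x hx
    have hxm : x < m + 1 := by simpa using List.mem_range.mp hx
    rw [if_neg (by omega)]
    simp
  | succ fuel ih =>
    intro a ha2 hfa g
    by_cases ham : a ≤ m
    · rw [PySem.List.pyRange_one_cons (by push_cast; omega), List.foldl_cons]
      have hcast : ((a : Int) + 1) = (((a + 1 : Nat)) : Int) := by push_cast [Nat.cast_add]; ring
      rw [isPrime_eq a ha2]
      by_cases hp : a.Prime
      · rw [if_pos (by simp [hp])]
        have hm2 : 2 ≤ m := by omega
        have hrun := qLoopB_run m a ha2 ham m 1 g le_rfl
          (by rw [pow_one]; calc m < 2 * m := by omega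
                _ ≤ a * m := Nat.mul_le_mul_right _ ha2)
        rw [pow_one] at hrun
        rw [hrun]
        have hleg : (∑ i ∈ Finset.Ico 1 (Nat.log a m + 1), m / a ^ i)
            = m.factorial.factorization a :=
          (Nat.factorization_factorial hp (by omega)).symm
        rw [hleg, hcast, ih (a + 1) (by omega) (by omega) _]
        apply List.map_congr_left
        intro x hx
        by_cases hxa : x = a
        · subst hxa
          rw [Function.update_self, if_neg (by omega), if_pos le_rfl]
          ring
        · rw [Function.update_apply, if_neg hxa]
          have : (if a + 1 ≤ x then ((m.factorial.factorization x : Nat) : Int) else 0)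
               = (if a ≤ x then ((m.factorial.factorization x : Nat) : Int) else 0) := by
            split_ifs with u v v <;> first | rfl | omega
          rw [this]
      · rw [if_neg (by simp [hp])]
        rw [hcast, ih (a + 1) (by omega) (by omega) g]
        apply List.map_congr_left
        intro x hx
        by_cases hxa : x = a
        · subst hxa
          have hfz : m.factorial.factorization x = 0 :=
            Nat.factorization_eq_zero_of_not_prime m.factorial hp
          rw [if_neg (by omega), if_pos le_rfl, hfz]
          simp
        · have : (if a + 1 ≤ x then ((m.factorial.factorization x : Nat) : Int) else 0)
               = (if a ≤ x then ((m.factorial.factorization x : Nat) : Int) else 0) := by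
            split_ifs with u v v <;> first | rfl | omega
          rw [this]
    · rw [PySem.List.pyRange_one_eq_nil (by push_cast; omega)]
      simp only [List.foldl_nil]
      apply List.map_congr_left
      intro x hx
      have hxm : x < m + 1 := by simpa using List.mem_range.mp hx
      rw [if_neg (by omega)]
      simp

lemma f_alt_eq (m : Nat) :
    f_alt ((m : Nat) : Int) = (List.range (m + 1)).map (fun x => ((m.factorial.factorization x : Nat) : Int)) := by
  show ((PySem.List.pyRange 2 ((m : Int) + 1)).foldl _ (PySem.List.pyRepeat [(0 : Int)] ((m : Int) + 1))) = _
  have hinit : PySem.List.pyRepeat [(0 : Int)] ((m : Int) + 1)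
      = (List.range (m + 1)).map (fun _ => (0 : Int)) := by
    rw [PySem.List.pyRepeat_singleton]
    have hL : (((m : Int) + 1)).toNat = m + 1 := by omega
    rw [hL]; apply List.ext_getElem <;> simp
  rw [hinit]
  simp only [Int.toNat_natCast]
  have hc2 : (2 : Int) = (((2 : Nat)) : Int) := by norm_num
  rw [hc2]
  have h := outerB m m 2 le_rfl (by omega) (fun _ => (0 : Int))
  rw [h]
  apply List.map_congr_left
  intro x hx
  by_cases h2x : 2 ≤ x
  · rw [if_pos h2x]; ring
  · rw [if_neg h2x]
    have : ¬ x.Prime := by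
      interval_cases x
      · exact Nat.not_prime_zero
      · exact Nat.not_prime_one
    rw [Nat.factorization_eq_zero_of_not_prime _ this]
    simp

lemma f_neg (n : Int) (hn : n < 0) : f n = [] ∧ f_alt n = [] := by
  constructor
  · show ((PySem.List.pyRange 2 (n + 1)).foldl _ ((PySem.List.pyRange 0 (n + 1)).map (fun _ => (0 : Int)))) = _
    rw [PySem.List.pyRange_one_eq_nil (show n + 1 ≤ 2 by omega),
        PySem.List.pyRange_one_eq_nil (show n + 1 ≤ 0 by omega)]
    simp
  · show ((PySem.List.pyRange 2 (n + 1)).foldl _ (PySem.List.pyRepeat [(0 : Int)] (n + 1))) = _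
    rw [PySem.List.pyRange_one_eq_nil (show n + 1 ≤ 2 by omega), PySem.List.pyRepeat_singleton]
    simp [Int.toNat_of_nonpos (show n + 1 ≤ 0 by omega)]

-- ===== VERDICT (by name: the statement is the Claim_ definition above) =====
theorem f_spec : Claim_equal_f := by
  intro n _
  show f n = f_alt n
  by_cases hn : 0 ≤ n
  · have hm : n = ((n.toNat : Nat) : Int) := (Int.toNat_of_nonneg hn).symm
    rw [hm, f_eq, f_alt_eq]
  · obtain ⟨h1, h2⟩ := f_neg n (by omega)
    rw [h1, h2]
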